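-- pv_equiv track=rewrite | github.com/COS301-SE-2025/CRISP | crisp_settings/main_test_runner.py | _categorize_test
-- ===== SOURCE A (Python) =====
-- def _categorize_test(class_name: str, method_name: str) -> int:
--     """Determine which test suite a test belongs to"""
--
--     #Foundation Tests (0)
--     if any(x in class_name.lower() for x in ['decorator', 'observer', 'factory']):
--         return 0
--
--     #Data Layer Tests (1)
--     if 'repository' in class_name.lower():
--         return 1
--
--     #Service Layer Tests (2)
--     if any(x in class_name.lower() for x in ['taxii', 'service', 'parser']):
--         return 2
--
--     #Integration Tests (3)
--     if any(x in class_name.lower() for x in ['integration', 'end_to_end']):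
--         return 3
--
--     #API Tests (4)
--     if any(x in class_name.lower() for x in ['command', 'api', 'endpoint']):
--         return 4
--
--     return 2
-- ===== SOURCE B (Python) =====
-- # Flat keyword->category map; since A's rule chain checks categories in
-- # ascending order, "first matching rule" == "minimum category over all
-- # matching keywords" (default 2 when none match).
-- _KEYWORD_CATEGORIES = {
--     'decorator': 0, 'observer': 0, 'factory': 0,
--     'repository': 1,
--     'taxii': 2, 'service': 2, 'parser': 2,
--     'integration': 3, 'end_to_end': 3,
--     'command': 4, 'api': 4, 'endpoint': 4,
-- }
--
--
-- def _categorize_test(class_name: str, method_name: str) -> int: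
--     name = class_name.lower()
--     return min((cat for kw, cat in _KEYWORD_CATEGORIES.items() if kw in name),
--                default=2)
-- ===== Notes on version B (the rewrite author's own statement) =====
-- stated objective: alternative
-- what changed: Instead of an ordered early-return rule chain, B scans one flat keyword-to-category map and returns the MINIMUM category over all matching keywords (default 2); this is equivalent because A's branches test categories in ascending order, so the first match is the least match.
import Mathlib
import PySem

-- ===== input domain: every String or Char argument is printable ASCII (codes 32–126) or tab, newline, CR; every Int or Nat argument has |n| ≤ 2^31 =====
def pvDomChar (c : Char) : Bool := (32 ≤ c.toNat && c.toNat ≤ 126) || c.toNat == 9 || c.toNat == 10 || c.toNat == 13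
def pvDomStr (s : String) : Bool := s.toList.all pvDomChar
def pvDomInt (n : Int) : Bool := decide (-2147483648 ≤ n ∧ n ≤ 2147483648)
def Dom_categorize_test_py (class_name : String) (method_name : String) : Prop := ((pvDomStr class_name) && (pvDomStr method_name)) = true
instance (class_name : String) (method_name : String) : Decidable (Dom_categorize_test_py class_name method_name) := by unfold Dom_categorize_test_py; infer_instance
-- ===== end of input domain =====

-- B replaces A's ordered early-return rule chain with a flat keyword→category map and a
-- minimum over all matching keywords (default 2) — equal because A tests categories in
-- ascending order; objective: alternative. method_name is unused, as in A.

-- ===== PORT A =====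
def categorize_test_py (class_name : String) (method_name : String) : Int :=
  if ["decorator", "observer", "factory"].any (fun x => PySem.Str.isIn x (PySem.Str.lower class_name)) then 0
  else if PySem.Str.isIn "repository" (PySem.Str.lower class_name) then 1
  else if ["taxii", "service", "parser"].any (fun x => PySem.Str.isIn x (PySem.Str.lower class_name)) then 2
  else if ["integration", "end_to_end"].any (fun x => PySem.Str.isIn x (PySem.Str.lower class_name)) then 3
  else if ["command", "api", "endpoint"].any (fun x => PySem.Str.isIn x (PySem.Str.lower class_name)) then 4
  else 2

-- ===== PORT B =====
def pvKeywordCategories : List (String × Int) :=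
  [("decorator", 0), ("observer", 0), ("factory", 0),
   ("repository", 1),
   ("taxii", 2), ("service", 2), ("parser", 2),
   ("integration", 3), ("end_to_end", 3),
   ("command", 4), ("api", 4), ("endpoint", 4)]

def categorize_test_py_alt (class_name : String) (method_name : String) : Int :=
  let name := PySem.Str.lower class_name
  let cats := (pvKeywordCategories.filter (fun p => PySem.Str.isIn p.1 name)).map Prod.snd
  (PySem.List.min? cats (fun c => c)).getD 2

-- ===== PRECONDITION & SPEC =====
def Spec_categorize_test_py (class_name : String) (method_name : String) (out : Int) : Prop := out = categorize_test_py_alt class_name method_name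
instance (class_name : String) (method_name : String) (out : Int) : Decidable (Spec_categorize_test_py class_name method_name out) := by unfold Spec_categorize_test_py; infer_instance

-- ===== CLAIM =====
def Claim_equal_categorize_test_py : Prop := ∀ (class_name : String) (method_name : String), Dom_categorize_test_py class_name method_name → Spec_categorize_test_py class_name method_name (categorize_test_py class_name method_name)

-- ===== LEMMAS AND PROOFS =====

-- ===== VERDICT =====
set_option maxHeartbeats 4000000 in
theorem categorize_test_py_spec : Claim_equal_categorize_test_py := by
  intro class_name method_name _
  unfold Spec_categorize_test_py categorize_test_py categorize_test_py_alt pvKeywordCategories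
  simp only [List.any_cons, List.any_nil, Bool.or_false, List.filter_cons, List.filter_nil]
  generalize PySem.Str.isIn "decorator" (PySem.Str.lower class_name) = b1
  generalize PySem.Str.isIn "observer" (PySem.Str.lower class_name) = b2
  generalize PySem.Str.isIn "factory" (PySem.Str.lower class_name) = b3
  generalize PySem.Str.isIn "repository" (PySem.Str.lower class_name) = b4
  generalize PySem.Str.isIn "taxii" (PySem.Str.lower class_name) = b5
  generalize PySem.Str.isIn "service" (PySem.Str.lower class_name) = b6
  generalize PySem.Str.isIn "parser" (PySem.Str.lower class_name) = b7
  generalize PySem.Str.isIn "integration" (PySem.Str.lower class_name) = b8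
  generalize PySem.Str.isIn "end_to_end" (PySem.Str.lower class_name) = b9
  generalize PySem.Str.isIn "command" (PySem.Str.lower class_name) = b10
  generalize PySem.Str.isIn "api" (PySem.Str.lower class_name) = b11
  generalize PySem.Str.isIn "endpoint" (PySem.Str.lower class_name) = b12
  revert b1 b2 b3 b4 b5 b6 b7 b8 b9 b10 b11 b12
  decide
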